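-- pv_equiv track=rewrite | github.com/javastuck/Logic | dyadic_encoder.py | encoded_val
-- ===== SOURCE A (Python) =====
-- def encoded_val(x):
--     """ :param x: the dyadic numeral encoding
--         :return: the conceptual number encoded by x
--     """
--
--     val = 0
--     power = 0
--     while x>0:
--         val += (2**power)*(2-x%2)
--         x = x//10
--         power += 1
--     return val
-- ===== SOURCE B (Python) =====
-- def encoded_val(x):
--     """ :param x: the dyadic numeral encoding
--         :return: the conceptual number encoded by x
--     """
--     digits = []
--     while x > 0:
--         digits.append(x % 10)
--         x //= 10
--     val = 0
--     for d in reversed(digits):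
--         val = val * 2 + (2 - d % 2)
--     return val
-- ===== Notes on version B (the rewrite author's own statement) =====
-- stated objective: alternative
-- what changed: Replaces the single loop that tracks an explicit power variable and adds powers of two least-significant-digit first with a two-pass Horner scheme: collect the decimal digits, then fold them most-significant-first with a doubling accumulator, eliminating the power variable and the exponentiation.
import Mathlib
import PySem

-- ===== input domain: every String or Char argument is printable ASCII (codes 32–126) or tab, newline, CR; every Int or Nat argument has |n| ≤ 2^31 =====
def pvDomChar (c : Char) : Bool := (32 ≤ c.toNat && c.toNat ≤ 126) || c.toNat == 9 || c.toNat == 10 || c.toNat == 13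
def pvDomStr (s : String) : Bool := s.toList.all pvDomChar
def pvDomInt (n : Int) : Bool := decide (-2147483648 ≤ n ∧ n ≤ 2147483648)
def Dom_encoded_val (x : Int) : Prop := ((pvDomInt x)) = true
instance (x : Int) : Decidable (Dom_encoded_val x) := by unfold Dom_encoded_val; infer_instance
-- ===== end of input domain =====

-- B replaces A's power-tracking loop (adding (2**power)*(2-x%2) least-significant-digit first)
-- by a two-pass Horner scheme: collect the decimal digits, then fold them most-significant-first.


-- ===== PORT A =====
-- Python's 2**power: power starts at 0 and only increases, so 2 ^ power.toNat is exact here.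
def encLoop (x val power : Int) : Int :=
  if x > 0 then
    encLoop (PySem.Int.floordiv x 10) (val + 2 ^ power.toNat * (2 - PySem.Int.mod x 2)) (power + 1)
  else val
termination_by x.toNat
decreasing_by
  rw [PySem.Int.floordiv_eq_ediv_of_pos (by omega : (0:Int) < 10)]; omega

def encoded_val (x : Int) : Int := encLoop x 0 0

-- ===== PORT B =====
def digitsLoop (x : Int) (digits : List Int) : List Int :=
  if x > 0 then digitsLoop (PySem.Int.floordiv x 10) (digits ++ [PySem.Int.mod x 10]) else digits
termination_by x.toNat
decreasing_by
  rw [PySem.Int.floordiv_eq_ediv_of_pos (by omega : (0:Int) < 10)]; omega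

def encoded_val_alt (x : Int) : Int :=
  ((digitsLoop x []).reverse).foldl (fun val d => val * 2 + (2 - PySem.Int.mod d 2)) 0

-- ===== PRECONDITION & SPEC =====
def Spec_encoded_val (x : Int) (out : Int) : Prop := out = encoded_val_alt x
instance (x : Int) (out : Int) : Decidable (Spec_encoded_val x out) := by unfold Spec_encoded_val; infer_instance

-- ===== CLAIM (what is proved, stated in full; the proofs are below) =====
def Claim_equal_encoded_val : Prop := ∀ (x : Int), Dom_encoded_val x → Spec_encoded_val x (encoded_val x)

-- ===== LEMMAS AND PROOFS =====

theorem digitsLoop_acc (n : Nat) : ∀ (x : Int) (acc : List Int), x.toNat ≤ n →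
    digitsLoop x acc = acc ++ digitsLoop x [] := by
  induction n with
  | zero =>
      intro x acc hle
      rw [digitsLoop, if_neg (by omega), digitsLoop, if_neg (by omega), List.append_nil]
  | succ n ih =>
      intro x acc hle
      by_cases hx : x > 0
      · have hq : PySem.Int.floordiv x 10 = x / 10 :=
          PySem.Int.floordiv_eq_ediv_of_pos (by omega)
        have hle' : (PySem.Int.floordiv x 10).toNat ≤ n := by rw [hq]; omega
        rw [digitsLoop, if_pos hx, ih _ _ hle']
        conv_rhs => rw [digitsLoop, if_pos hx, ih _ _ hle']
        simp
      · rw [digitsLoop, if_neg hx]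
        conv_rhs => rw [digitsLoop, if_neg hx]
        simp

theorem alt_neg (x : Int) (hx : ¬ x > 0) : encoded_val_alt x = 0 := by
  unfold encoded_val_alt
  rw [digitsLoop, if_neg hx]
  rfl

theorem alt_rec (x : Int) (hx : x > 0) :
    encoded_val_alt x =
      encoded_val_alt (PySem.Int.floordiv x 10) * 2 + (2 - PySem.Int.mod x 2) := by
  unfold encoded_val_alt
  rw [digitsLoop, if_pos hx, List.nil_append,
    digitsLoop_acc (PySem.Int.floordiv x 10).toNat _ _ le_rfl]
  rw [List.reverse_append, List.foldl_append]
  have h10 : PySem.Int.mod x 10 = x % 10 := PySem.Int.mod_eq_emod_of_pos (by omega)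
  have h2a : PySem.Int.mod (x % 10) 2 = x % 10 % 2 :=
    PySem.Int.mod_eq_emod_of_pos (by omega)
  have h2b : PySem.Int.mod x 2 = x % 2 := PySem.Int.mod_eq_emod_of_pos (by omega)
  simp only [List.reverse_singleton, List.foldl_cons, List.foldl_nil, h10, h2a, h2b]
  omega

theorem encLoop_eq (n : Nat) : ∀ (x val power : Int), x.toNat ≤ n → 0 ≤ power →
    encLoop x val power = val + 2 ^ power.toNat * encoded_val_alt x := by
  induction n with
  | zero =>
      intro x val power hle hp
      rw [encLoop, if_neg (by omega), alt_neg x (by omega)]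
      ring
  | succ n ih =>
      intro x val power hle hp
      by_cases hx : x > 0
      · rw [encLoop, if_pos hx, alt_rec x hx]
        have hq : PySem.Int.floordiv x 10 = x / 10 :=
          PySem.Int.floordiv_eq_ediv_of_pos (by omega)
        have hle' : (PySem.Int.floordiv x 10).toNat ≤ n := by rw [hq]; omega
        rw [ih _ _ _ hle' (by omega)]
        have hpn : (power + 1).toNat = power.toNat + 1 := by omega
        rw [hpn]
        ring
      · rw [encLoop, if_neg hx, alt_neg x hx]; ring

-- ===== VERDICT (by name: the statement is the Claim_ definition above) =====
theorem encoded_val_spec : Claim_equal_encoded_val := by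
  intro x _
  show encoded_val x = encoded_val_alt x
  rw [encoded_val, encLoop_eq x.toNat x 0 0 le_rfl le_rfl]
  norm_num
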